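-- pv_equiv track=rewrite | github.com/PodYapolskiy/follow-my-reading | core/processing/text.py | __prep_text
-- ===== SOURCE A (Python) =====
-- from typing import List, Tuple, Any
--
-- def __prep_text(text: str) -> Tuple[str, List[int]]:
--     """
--     Prepares the text, so it is fully lowercase and does not contain any non-letter symbols
--     It is using inbuilt isalpha() and lower() functions, so it should support multiple languages
--     :param text: the text to be prepared
--     :return: the changed text and a list of indices that map the changed text to the initial one
--     """
--
--     changed: str = ""
--     indices: List[int] = []
--
--     # Remove any non-letter symbols
--     for i in range(len(text)):
--         if text[i].isalpha() or text[i] == " " and (len(changed) == 0 or changed[-1] != " "):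
--             changed += text[i]
--             indices.append(i)
--
--     # Cut off any unnecessary spaces in the beginning and end
--     indices = indices[len(changed) - len(changed.lstrip()):]
--
--     if changed.rstrip() != changed:
--         indices = indices[: len(changed.rstrip()) - len(changed)]
--
--     return changed.lower().strip(), indices
-- ===== SOURCE B (Python) =====
-- from typing import List, Tuple
--
--
-- def __prep_text(text: str) -> Tuple[str, List[int]]:
--     """
--     Single pass that emits exactly the final text: alphabetic characters are
--     appended already lowercased, and a separating space is emitted lazily --
--     the index of the first space seen since the last letter is held in
--     `pending` and flushed only when another letter arrives, so leading and
--     trailing spaces never enter the output and no strip/slice fix-up is needed.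
--     """
--     out: List[str] = []
--     indices: List[int] = []
--     started = False      # a letter has been emitted
--     pending = None       # index of first space seen since the last letter
--     for i, c in enumerate(text):
--         if c.isalpha():
--             if started and pending is not None:
--                 out.append(" ")
--                 indices.append(pending)
--             out.append(c.lower())
--             indices.append(i)
--             started = True
--             pending = None
--         elif c == " " and pending is None:
--             pending = i
--     return "".join(out), indices
-- ===== Notes on version B (the rewrite author's own statement) =====
-- stated objective: simpler
-- what changed: A appends original-case kept characters (collapsing runs of spaces by inspecting the last output character) and then repairs the result with lstrip/rstrip length arithmetic, index slicing, lower() and strip(); B is a single state machine that emits the final text directly: letters are emitted lowercased and a separating space (the first space index seen since the last letter, held in a 'pending' slot) is flushed only when another letter arrives, so leading/trailing spaces never enter the output and no post-trimming pass exists.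
import Mathlib
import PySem

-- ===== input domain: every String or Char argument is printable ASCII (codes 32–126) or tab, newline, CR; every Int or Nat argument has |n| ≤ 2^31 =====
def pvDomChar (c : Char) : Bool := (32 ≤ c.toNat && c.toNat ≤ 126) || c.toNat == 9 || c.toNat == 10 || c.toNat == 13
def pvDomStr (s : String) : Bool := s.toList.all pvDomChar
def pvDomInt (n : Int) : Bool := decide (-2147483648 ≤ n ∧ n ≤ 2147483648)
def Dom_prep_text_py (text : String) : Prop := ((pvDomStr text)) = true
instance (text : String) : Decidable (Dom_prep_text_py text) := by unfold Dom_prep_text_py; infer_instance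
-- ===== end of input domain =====

-- B rewrites A's emit-then-strip loop as a single lazy-space state machine (no post-trimming); same value, similar cost (objective: simpler).

-- ===== PORT A =====
def prep_text_py (text : String) : String × List Int :=
  let s := text.toList
  let res := (PySem.List.pyRange 0 (PySem.Str.len text) 1).foldl
    (fun (st : List Char × List Int) i =>
      if PySem.Chars.isalpha (PySem.List.pyGetD s i ' ') ||
         ((PySem.List.pyGetD s i ' ') == ' ' &&
          (st.1.length == 0 || !(PySem.List.pyGetD st.1 (-1) ' ' == ' ')))
      then (st.1 ++ [PySem.List.pyGetD s i ' '], st.2 ++ [i]) else st)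
    ([], [])
  let changed := res.1
  let indices := res.2
  let indices2 := PySem.List.slice indices
    (some ((changed.length : Int) - ((PySem.Chars.lstrip changed).length : Int))) none
  let indices3 :=
    if PySem.Chars.rstrip changed ≠ changed then
      PySem.List.slice indices2 none
        (some (((PySem.Chars.rstrip changed).length : Int) - (changed.length : Int)))
    else indices2
  (String.ofList (PySem.Chars.strip (PySem.Chars.lower changed)), indices3)

-- ===== PORT B =====
def prep_text_py_alt (text : String) : String × List Int :=
  let res := (PySem.List.enumerate text.toList).foldl
    (fun (st : (List Char × List Int) × Bool × Option Int) p =>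
      if PySem.Chars.isalpha p.2 then
        let oi := match st.2.1, st.2.2 with
          | true, some q => (st.1.1 ++ [' '], st.1.2 ++ [q])
          | _, _ => st.1
        ((oi.1 ++ [PySem.Chars.lowerChar p.2], oi.2 ++ [p.1]), true, none)
      else if p.2 == ' ' && st.2.2.isNone then (st.1, st.2.1, some p.1)
      else st)
    (([], []), false, none)
  (String.ofList res.1.1, res.1.2)

-- ===== PRECONDITION & SPEC =====
def Spec_prep_text_py (text : String) (out : String × List Int) : Prop := out = prep_text_py_alt text
instance (text : String) (out : String × List Int) : Decidable (Spec_prep_text_py text out) := by unfold Spec_prep_text_py; infer_instance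

-- ===== CLAIM (what is proved, stated in full; the proofs are below) =====
def Claim_equal_prep_text_py : Prop := ∀ (text : String), Dom_prep_text_py text → Spec_prep_text_py text (prep_text_py text)

-- ===== LEMMAS AND PROOFS =====

-- A's loop body, as a step function over (index, char) pairs
def pvStepA (st : List Char × List Int) (p : Int × Char) : List Char × List Int :=
  if PySem.Chars.isalpha p.2 ||
     (p.2 == ' ' && (st.1.length == 0 || !(PySem.List.pyGetD st.1 (-1) ' ' == ' ')))
  then (st.1 ++ [p.2], st.2 ++ [p.1]) else st

-- B's loop body
def pvStepB (st : (List Char × List Int) × Bool × Option Int) (p : Int × Char) :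
    (List Char × List Int) × Bool × Option Int :=
  if PySem.Chars.isalpha p.2 then
    let oi := match st.2.1, st.2.2 with
      | true, some q => (st.1.1 ++ [' '], st.1.2 ++ [q])
      | _, _ => st.1
    ((oi.1 ++ [PySem.Chars.lowerChar p.2], oi.2 ++ [p.1]), true, none)
  else if p.2 == ' ' && st.2.2.isNone then (st.1, st.2.1, some p.1)
  else st

-- "this kept pair is a space"
def pvSp (p : Int × Char) : Bool := p.2 == ' '

-- what A's loop keeps: space-collapsing filter; the Bool state is "last kept char is a space"
def pvCollapse : List (Int × Char) → Bool → List (Int × Char)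
  | [], _ => []
  | (i, c) :: t, sp =>
    if PySem.Chars.isalpha c then (i, c) :: pvCollapse t false
    else if c == ' ' then (if sp then pvCollapse t true else (i, c) :: pvCollapse t true)
    else pvCollapse t sp

-- what B's loop emits, as a recursion over (index, char) pairs
def pvG : List (Int × Char) → Bool → Option Int → List Char × List Int
  | [], _, _ => ([], [])
  | (i, c) :: t, started, pending =>
    if PySem.Chars.isalpha c then
      let r := pvG t true none
      match started, pending with
      | true, some q => (' ' :: PySem.Chars.lowerChar c :: r.1, q :: i :: r.2)
      | _, _ => (PySem.Chars.lowerChar c :: r.1, i :: r.2)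
    else if c == ' ' && pending.isNone then pvG t started (some i)
    else pvG t started pending

def pvOut (L : List (Int × Char)) : List Char × List Int :=
  (L.map (fun p => PySem.Chars.lowerChar p.2), L.map Prod.fst)

-- drop leading kept spaces / trailing kept spaces
def pvDL (L : List (Int × Char)) : List (Int × Char) := L.dropWhile pvSp

def pvTT : List (Int × Char) → List (Int × Char)
  | [] => []
  | q :: L => if pvTT L = [] ∧ pvSp q then [] else q :: pvTT L

def pvLastSp (ch : List Char) : Bool := ch.getLast? == some ' '

lemma pv_alpha_ne_space {c : Char} (h : PySem.Chars.isalpha c = true) : (c == ' ') = false := by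
  rcases eq_or_ne c ' ' with rfl | hne
  · exact absurd h (by decide)
  · simp [hne]

lemma pv_upper_bounds {c : Char} (h : PySem.Chars.isupper c = true) :
    65 ≤ c.toNat ∧ c.toNat ≤ 90 := by
  simp only [PySem.Chars.isupper, Char.le_def, UInt32.le_iff_toNat_le,
    Bool.and_eq_true, decide_eq_true_eq] at h
  have hA : 'A'.val.toNat = 65 := rfl
  have hZ : 'Z'.val.toNat = 90 := rfl
  have hv : Char.toNat c = c.val.toNat := rfl
  omega

lemma pv_isspace_eq {c : Char} (h : PySem.Chars.isalpha c = true ∨ c = ' ') :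
    PySem.Chars.isspace c = (c == ' ') := by
  rcases h with h | rfl
  · have hne : c ≠ ' ' := by rintro rfl; exact absurd h (by decide)
    simp only [PySem.Chars.isalpha, PySem.Chars.isupper, PySem.Chars.islower, Char.le_def,
      UInt32.le_iff_toNat_le, Bool.or_eq_true, Bool.and_eq_true, decide_eq_true_eq] at h
    have hv : Char.toNat c = c.val.toNat := rfl
    have hA : 'A'.val.toNat = 65 := rfl
    have hZ : 'Z'.val.toNat = 90 := rfl
    have ha : 'a'.val.toNat = 97 := rfl
    have hz : 'z'.val.toNat = 122 := rfl
    rw [hA, hZ, ha, hz] at h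
    rw [beq_eq_false_iff_ne.mpr hne, Bool.eq_false_iff]
    intro hs
    simp only [PySem.Chars.isspace, Bool.or_eq_true, Bool.and_eq_true, decide_eq_true_eq] at hs
    rw [hv] at hs
    omega
  · decide

lemma pv_isspace_lower {c : Char} (h : PySem.Chars.isalpha c = true ∨ c = ' ') :
    PySem.Chars.isspace (PySem.Chars.lowerChar c) = (c == ' ') := by
  rcases h with h | rfl
  · rw [pv_alpha_ne_space h, Bool.eq_false_iff]
    by_cases hU : PySem.Chars.isupper c = true
    · obtain ⟨h1, h2⟩ := pv_upper_bounds hU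
      have hval : (c.toNat + 32).isValidChar := Or.inl (by omega)
      have ht : (PySem.Chars.lowerChar c).toNat = c.toNat + 32 := by
        rw [PySem.Chars.lowerChar, if_pos hU, Char.toNat_ofNat, if_pos hval]
      intro hs
      simp only [PySem.Chars.isspace, Bool.or_eq_true, Bool.and_eq_true, decide_eq_true_eq] at hs
      rw [ht] at hs
      omega
    · rw [PySem.Chars.lowerChar, if_neg hU, ← Bool.eq_false_iff,
        pv_isspace_eq (Or.inl h), pv_alpha_ne_space h]
  · decide

lemma pv_collapse_mem : ∀ (e : List (Int × Char)) (sp : Bool) (p : Int × Char),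
    p ∈ pvCollapse e sp → PySem.Chars.isalpha p.2 = true ∨ p.2 = ' ' := by
  intro e
  induction e with
  | nil => intro sp p h; simp [pvCollapse] at h
  | cons q t ih =>
    obtain ⟨i, c⟩ := q
    intro sp p h
    simp only [pvCollapse] at h
    by_cases ha : PySem.Chars.isalpha c = true
    · rw [if_pos ha] at h
      rcases List.mem_cons.mp h with rfl | h
      · exact Or.inl ha
      · exact ih _ _ h
    · rw [if_neg ha] at h
      by_cases hsp : (c == ' ') = true
      · rw [if_pos hsp] at h
        cases sp with
        | true => rw [if_pos rfl] at h; exact ih _ _ h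
        | false =>
          rw [if_neg (by simp)] at h
          rcases List.mem_cons.mp h with rfl | h
          · exact Or.inr (beq_iff_eq.mp hsp)
          · exact ih _ _ h
      · rw [if_neg hsp] at h; exact ih _ _ h

-- the "may we keep a space" test in A = "last kept char is not a space"
lemma pv_condA_eq (ch : List Char) :
    ((ch.length == 0 : Bool) || !(PySem.List.pyGetD ch (-1) ' ' == ' ')) = !pvLastSp ch := by
  cases ch with
  | nil => simp [pvLastSp, PySem.List.pyGetD]
  | cons x l =>
    have hne : x :: l ≠ [] := List.cons_ne_nil x l
    rw [PySem.List.pyGetD_neg_one _ _ hne]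
    simp only [pvLastSp, List.getLast?_eq_some_getLast hne]
    simp

-- A's loop = pvCollapse
lemma pv_A_loop : ∀ (e : List (Int × Char)) (ch : List Char) (ix : List Int),
    e.foldl pvStepA (ch, ix) =
      (ch ++ (pvCollapse e (pvLastSp ch)).map Prod.snd,
       ix ++ (pvCollapse e (pvLastSp ch)).map Prod.fst) := by
  intro e
  induction e with
  | nil => intro ch ix; simp [pvCollapse]
  | cons q t ih =>
    obtain ⟨i, c⟩ := q
    intro ch ix
    rw [List.foldl_cons]
    by_cases ha : PySem.Chars.isalpha c = true
    · have hcond : (PySem.Chars.isalpha c ||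
          (c == ' ' && ((ch.length == 0 : Bool) || !(PySem.List.pyGetD ch (-1) ' ' == ' ')))) = true := by
        simp [ha]
      have hstep : pvStepA (ch, ix) (i, c) = (ch ++ [c], ix ++ [i]) := by
        simp only [pvStepA]; rw [if_pos hcond]
      rw [hstep, ih]
      have hls : pvLastSp (ch ++ [c]) = false := by
        simp only [pvLastSp, List.getLast?_concat]
        simp [pv_alpha_ne_space ha]
      rw [hls]
      simp only [pvCollapse, if_pos ha, List.map_cons, List.append_assoc, List.cons_append,
        List.nil_append]
    · by_cases hsp : (c == ' ') = true
      · have hc : c = ' ' := beq_iff_eq.mp hsp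
        cases hLS : pvLastSp ch with
        | false =>
          have hcond : (PySem.Chars.isalpha c ||
              (c == ' ' && ((ch.length == 0 : Bool) || !(PySem.List.pyGetD ch (-1) ' ' == ' ')))) = true := by
            rw [pv_condA_eq, hLS]; simp [hsp]
          have hstep : pvStepA (ch, ix) (i, c) = (ch ++ [c], ix ++ [i]) := by
            simp only [pvStepA]; rw [if_pos hcond]
          rw [hstep, ih]
          have hls : pvLastSp (ch ++ [c]) = true := by
            simp only [pvLastSp, List.getLast?_concat, hc]; simp
          rw [hls]
          simp only [pvCollapse, if_neg ha, if_pos hsp, if_neg (by simp : ¬(false = true)),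
            List.map_cons, List.append_assoc, List.cons_append, List.nil_append]
        | true =>
          have hcond : (PySem.Chars.isalpha c ||
              (c == ' ' && ((ch.length == 0 : Bool) || !(PySem.List.pyGetD ch (-1) ' ' == ' ')))) = false := by
            rw [pv_condA_eq, hLS]; simp [ha]
          have hstep : pvStepA (ch, ix) (i, c) = (ch, ix) := by
            simp only [pvStepA]; rw [if_neg (by simp [hcond])]
          rw [hstep, ih, hLS]
          simp [pvCollapse, if_neg ha]
      · have hcond : (PySem.Chars.isalpha c ||
            (c == ' ' && ((ch.length == 0 : Bool) || !(PySem.List.pyGetD ch (-1) ' ' == ' ')))) = false := by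
          simp [ha, hsp]
        have hstep : pvStepA (ch, ix) (i, c) = (ch, ix) := by
          simp only [pvStepA]; rw [if_neg (by simp [hcond])]
        rw [hstep, ih]
        simp only [pvCollapse, if_neg ha, if_neg hsp]

-- B's loop = pvG
lemma pv_B_loop : ∀ (e : List (Int × Char)) (out : List Char) (ix : List Int)
    (started : Bool) (pending : Option Int),
    (e.foldl pvStepB ((out, ix), started, pending)).1 =
      (out ++ (pvG e started pending).1, ix ++ (pvG e started pending).2) := by
  intro e
  induction e with
  | nil => intro out ix started pending; simp [pvG]
  | cons q t ih =>
    obtain ⟨i, c⟩ := q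
    intro out ix started pending
    rw [List.foldl_cons]
    by_cases ha : PySem.Chars.isalpha c = true
    · simp only [pvStepB, pvG, if_pos ha]
      cases started <;> cases pending <;>
        simp [ih, List.append_assoc]
    · by_cases hsp : (c == ' ' && pending.isNone) = true
      · simp only [pvStepB, pvG, if_neg ha, if_pos hsp]
        exact ih _ _ _ _
      · simp only [pvStepB, pvG, if_neg ha, if_neg hsp]
        exact ih _ _ _ _

-- head of pvCollapse _ true is never a space; dropping the lead advances the state
lemma pv_dL_collapse_true : ∀ e, pvDL (pvCollapse e true) = pvCollapse e true := by
  intro e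
  induction e with
  | nil => rfl
  | cons q t ih =>
    obtain ⟨i, c⟩ := q
    simp only [pvCollapse]
    by_cases ha : PySem.Chars.isalpha c = true
    · rw [if_pos ha]
      simp [pvDL, List.dropWhile_cons, pvSp, pv_alpha_ne_space ha]
    · rw [if_neg ha]
      by_cases hsp : (c == ' ') = true
      · rw [if_pos hsp, if_pos trivial]; exact ih
      · rw [if_neg hsp]; exact ih

lemma pv_dL_collapse_false : ∀ e, pvDL (pvCollapse e false) = pvCollapse e true := by
  intro e
  induction e with
  | nil => rfl
  | cons q t ih =>
    obtain ⟨i, c⟩ := q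
    simp only [pvCollapse]
    by_cases ha : PySem.Chars.isalpha c = true
    · rw [if_pos ha, if_pos ha]
      simp [pvDL, List.dropWhile_cons, pvSp, pv_alpha_ne_space ha]
    · rw [if_neg ha, if_neg ha]
      by_cases hsp : (c == ' ') = true
      · rw [if_pos hsp, if_pos hsp, if_neg (by simp : ¬(false = true)), if_pos trivial]
        simp only [pvDL, List.dropWhile_cons, pvSp, hsp, if_pos rfl]
        exact pv_dL_collapse_true t
      · rw [if_neg hsp, if_neg hsp]; exact ih

-- the heart: B's emission = trimmed, lowercased collapse
lemma pv_main : ∀ e : List (Int × Char),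
    (pvG e true none = pvOut (pvTT (pvCollapse e false))) ∧
    (∀ q : Int, pvG e true (some q) = pvOut (pvTT ((q, ' ') :: pvCollapse e true))) ∧
    (∀ pd : Option Int, pvG e false pd = pvOut (pvTT (pvDL (pvCollapse e false)))) := by
  intro e
  induction e with
  | nil =>
    refine ⟨rfl, fun q => ?_, fun pd => rfl⟩
    simp [pvG, pvCollapse, pvTT, pvOut, pvSp]
  | cons p t ih =>
    obtain ⟨hA, hB, hC⟩ := ih
    obtain ⟨i, c⟩ := p
    by_cases ha : PySem.Chars.isalpha c = true
    · have hTTcons : ∀ L, pvTT ((i, c) :: L) = (i, c) :: pvTT L := by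
        intro L
        simp only [pvTT]
        rw [if_neg]
        rintro ⟨-, hsp⟩
        rw [pvSp, pv_alpha_ne_space ha] at hsp
        exact absurd hsp (by simp)
      refine ⟨?_, fun q => ?_, fun pd => ?_⟩
      · simp only [pvG, if_pos ha]
        rw [hA]
        simp only [pvCollapse, if_pos ha, hTTcons, pvOut, List.map_cons]
      · simp only [pvG, if_pos ha]
        rw [hA]
        have h2 : pvTT ((q, ' ') :: (i, c) :: pvCollapse t false) =
            (q, ' ') :: (i, c) :: pvTT (pvCollapse t false) := by
          have hin := hTTcons (pvCollapse t false)
          simp only [pvTT] at hin ⊢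
          rw [hin, if_neg]
          rintro ⟨hnil, -⟩
          exact absurd hnil (by simp)
        simp only [pvCollapse, if_pos ha, h2, pvOut, List.map_cons]
        have : PySem.Chars.lowerChar ' ' = ' ' := by decide
        simp [this]
      · simp only [pvG, if_pos ha]
        rw [hA]
        have hdl : pvDL ((i, c) :: pvCollapse t false) = (i, c) :: pvCollapse t false := by
          simp [pvDL, List.dropWhile_cons, pvSp, pv_alpha_ne_space ha]
        simp only [pvCollapse, if_pos ha, hdl, hTTcons, pvOut, List.map_cons]
    · by_cases hsp : (c == ' ') = true
      · have hc : c = ' ' := beq_iff_eq.mp hsp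
        subst hc
        refine ⟨?_, fun q => ?_, fun pd => ?_⟩
        · simp only [pvG, if_neg ha, if_pos (by simp : ((' ' == ' ') && (none : Option Int).isNone) = true)]
          rw [hB i]
          simp [pvCollapse, ha]
        · simp only [pvG, if_neg ha,
            if_neg (by simp : ¬((' ' == ' ') && (some q : Option Int).isNone) = true)]
          rw [hB q]
          simp [pvCollapse, ha]
        · have hrhs : pvDL (pvCollapse ((i, ' ') :: t) false) = pvCollapse t true := by
            have h1 : pvCollapse ((i, ' ') :: t) false = (i, ' ') :: pvCollapse t true := by
              simp [pvCollapse, ha]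
            rw [h1]
            have h2 : pvDL ((i, ' ') :: pvCollapse t true) = pvDL (pvCollapse t true) := by
              simp [pvDL, List.dropWhile_cons, pvSp]
            rw [h2]
            exact pv_dL_collapse_true t
          rw [hrhs]
          have hlhs2 : pvOut (pvTT (pvCollapse t true)) = pvG t false pd := by
            rw [hC pd, pv_dL_collapse_false]
          cases pd with
          | none =>
            simp only [pvG, if_neg ha, if_pos (by simp : ((' ' == ' ') && (none : Option Int).isNone) = true)]
            rw [hC (some i), pv_dL_collapse_false]
          | some q =>
            simp only [pvG, if_neg ha,
              if_neg (by simp : ¬((' ' == ' ') && (some q : Option Int).isNone) = true)]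
            rw [hC (some q), pv_dL_collapse_false]
      · have hcF : (c == ' ') = false := by simpa using hsp
        refine ⟨?_, fun q => ?_, fun pd => ?_⟩
        · simp only [pvG, if_neg ha, if_neg (by simp [hcF] : ¬((c == ' ') && (none : Option Int).isNone) = true)]
          rw [hA]
          simp only [pvCollapse, if_neg ha, if_neg hsp]
        · simp only [pvG, if_neg ha, if_neg (by simp [hcF] : ¬((c == ' ') && (some q : Option Int).isNone) = true)]
          rw [hB q]
          simp only [pvCollapse, if_neg ha, if_neg hsp]
        · simp only [pvG, if_neg ha, if_neg (by simp [hcF] : ¬((c == ' ') && pd.isNone) = true)]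
          rw [hC pd]
          simp only [pvCollapse, if_neg ha, if_neg hsp]

-- lstrip / rstrip on a mapped pair list
lemma pv_lstrip_map (f : (Int × Char) → Char) (X : List (Int × Char))
    (h : ∀ p ∈ X, PySem.Chars.isspace (f p) = pvSp p) :
    PySem.Chars.lstrip (X.map f) = (pvDL X).map f := by
  induction X with
  | nil => rfl
  | cons p X ih =>
    have hp := h p (List.mem_cons_self)
    have ih' := ih (fun q hq => h q (List.mem_cons_of_mem _ hq))
    simp only [List.map_cons, PySem.Chars.lstrip, List.dropWhile_cons] at *
    cases hsp : pvSp p with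
    | true => rw [hp, hsp, if_pos rfl, ih']; simp [pvDL, List.dropWhile_cons, hsp]
    | false => rw [hp, hsp, if_neg (by simp)]; simp [pvDL, List.dropWhile_cons, hsp]

lemma pv_rstrip_cons (c : Char) (l : List Char) :
    PySem.Chars.rstrip (c :: l) =
      if PySem.Chars.rstrip l = [] then (if PySem.Chars.isspace c then [] else [c])
      else c :: PySem.Chars.rstrip l := by
  simp only [PySem.Chars.rstrip, List.reverse_cons, List.dropWhile_append]
  by_cases hl : (List.dropWhile PySem.Chars.isspace l.reverse).isEmpty = true
  · rw [if_pos hl]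
    rw [List.isEmpty_iff] at hl
    rw [if_pos (by simp [hl])]
    by_cases hc : PySem.Chars.isspace c = true
    · simp [List.dropWhile_cons, hc]
    · simp [List.dropWhile_cons, hc]
  · rw [if_neg hl]
    rw [List.isEmpty_iff] at hl
    rw [if_neg (by simp [hl]), List.reverse_append]
    simp

lemma pv_rstrip_map (f : (Int × Char) → Char) (X : List (Int × Char))
    (h : ∀ p ∈ X, PySem.Chars.isspace (f p) = pvSp p) :
    PySem.Chars.rstrip (X.map f) = (pvTT X).map f := by
  induction X with
  | nil => rfl
  | cons p X ih =>
    have hp := h p (List.mem_cons_self)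
    have ih' := ih (fun q hq => h q (List.mem_cons_of_mem _ hq))
    rw [List.map_cons, pv_rstrip_cons, ih', hp]
    simp only [pvTT]
    by_cases hX : pvTT X = []
    · rw [if_pos (by simp [hX])]
      by_cases hsp : pvSp p = true
      · rw [if_pos (⟨hX, hsp⟩ : pvTT X = [] ∧ pvSp p = true), hsp]
        simp
      · rw [if_neg hsp, if_neg (fun h => hsp h.2)]
        simp [hX]
    · rw [if_neg (by simp [hX])]
      rw [if_neg (by rintro ⟨h1, -⟩; exact hX h1)]
      simp

lemma pv_TT_prefix : ∀ L : List (Int × Char), pvTT L <+: L := by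
  intro L
  induction L with
  | nil => exact List.nil_prefix
  | cons q L ih =>
    simp only [pvTT]
    by_cases h : pvTT L = [] ∧ pvSp q = true
    · rw [if_pos h]; exact List.nil_prefix
    · rw [if_neg h]
      obtain ⟨r, hr⟩ := ih
      exact ⟨r, by rw [List.cons_append, hr]⟩

lemma pv_TT_dL_comm : ∀ L : List (Int × Char), pvTT (pvDL L) = pvDL (pvTT L) := by
  intro L
  induction L with
  | nil => rfl
  | cons q L ih =>
    by_cases hsp : pvSp q = true
    · have h1 : pvDL (q :: L) = pvDL L := by
        simp [pvDL, List.dropWhile_cons, hsp]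
      rw [h1, ih]
      simp only [pvTT]
      by_cases hX : pvTT L = []
      · rw [if_pos ⟨hX, hsp⟩, hX]
      · rw [if_neg (by rintro ⟨h1, -⟩; exact hX h1)]
        simp [pvDL, List.dropWhile_cons, hsp]
    · have h1 : pvDL (q :: L) = q :: L := by
        simp only [pvDL, List.dropWhile_cons]
        rw [if_neg (by simpa using hsp)]
      rw [h1]
      simp only [pvTT]
      by_cases hX : pvTT L = []
      · rw [if_neg (by rintro ⟨-, h2⟩; exact hsp h2)]
        simp only [pvDL, List.dropWhile_cons]
        rw [if_neg (by simpa using hsp)]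
      · rw [if_neg (by rintro ⟨h2, -⟩; exact hX h2)]
        simp only [pvDL, List.dropWhile_cons]
        rw [if_neg (by simpa using hsp)]

lemma pv_dL_eq_drop (L : List (Int × Char)) :
    pvDL L = L.drop (L.length - (pvDL L).length) := by
  have hsplit : L.takeWhile pvSp ++ pvDL L = L := List.takeWhile_append_dropWhile
  have hlen : L.length - (pvDL L).length = (L.takeWhile pvSp).length := by
    have := congrArg List.length hsplit
    simp only [List.length_append] at this
    omega
  rw [hlen]
  conv_lhs => rw [← List.drop_left (l₁ := L.takeWhile pvSp) (l₂ := pvDL L)]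
  rw [hsplit]

lemma pv_TT_cons_nsp (m : Int × Char) (M : List (Int × Char)) (hm : pvSp m = false) :
    pvTT (m :: M) = m :: pvTT M := by
  simp only [pvTT]
  rw [if_neg (by rintro ⟨-, h2⟩; rw [hm] at h2; exact absurd h2 (by simp))]

lemma pv_TT_append (T M : List (Int × Char)) (hM : pvTT M ≠ []) :
    pvTT (T ++ M) = T ++ pvTT M := by
  induction T with
  | nil => simp
  | cons u T ih =>
    rw [List.cons_append]
    simp only [pvTT]
    rw [ih, if_neg (by rintro ⟨h1, -⟩; exact hM (List.append_eq_nil_iff.mp h1).2)]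
    simp

-- the pyRange-indexed fold in A is the enumerate fold
lemma pv_foldA (text : String) :
    (PySem.List.pyRange 0 (PySem.Str.len text) 1).foldl
      (fun st j => pvStepA st (j, PySem.List.pyGetD text.toList j ' ')) ([], []) =
    (PySem.List.enumerate text.toList).foldl pvStepA ([], []) := by
  rw [show PySem.Str.len text = PySem.List.len text.toList from rfl,
    PySem.List.enumerate_eq_map_pyRange text.toList ' ', List.foldl_map]

-- ===== VERDICT (by name: the statement is the Claim_ definition above) =====
theorem prep_text_py_spec : Claim_equal_prep_text_py := by
  unfold Claim_equal_prep_text_py Spec_prep_text_py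
  intro text _
  simp only [prep_text_py, prep_text_py_alt]
  have hbodyA : (fun (st : List Char × List Int) i =>
      if PySem.Chars.isalpha (PySem.List.pyGetD text.toList i ' ') ||
         ((PySem.List.pyGetD text.toList i ' ') == ' ' &&
          ((st.1.length == 0 : Bool) || !(PySem.List.pyGetD st.1 (-1) ' ' == ' ')))
      then (st.1 ++ [PySem.List.pyGetD text.toList i ' '], st.2 ++ [i]) else st) =
      (fun st j => pvStepA st (j, PySem.List.pyGetD text.toList j ' ')) := rfl
  have hbodyB : (fun (st : (List Char × List Int) × Bool × Option Int) (p : Int × Char) =>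
      if PySem.Chars.isalpha p.2 then
        let oi := match st.2.1, st.2.2 with
          | true, some q => (st.1.1 ++ [' '], st.1.2 ++ [q])
          | _, _ => st.1
        ((oi.1 ++ [PySem.Chars.lowerChar p.2], oi.2 ++ [p.1]), true, none)
      else if p.2 == ' ' && st.2.2.isNone then (st.1, st.2.1, some p.1)
      else st) = pvStepB := rfl
  rw [hbodyA, hbodyB, pv_foldA text]
  set e := PySem.List.enumerate text.toList with he
  set L := pvCollapse e false with hLdef
  have hAL : e.foldl pvStepA ([], []) = (L.map Prod.snd, L.map Prod.fst) := by
    have h := pv_A_loop e [] []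
    simpa [pvLastSp] using h
  have hBL : (e.foldl pvStepB (([], []), false, none)).1 =
      ((pvG e false none).1, (pvG e false none).2) := by
    simpa using pv_B_loop e [] [] false none
  rw [hAL, hBL]
  set M := pvDL L with hMdef
  have hG : pvG e false none = pvOut (pvTT M) := (pv_main e).2.2 none
  rw [hG]
  have hmem : ∀ p ∈ L, PySem.Chars.isalpha p.2 = true ∨ p.2 = ' ' :=
    fun p hp => pv_collapse_mem e false p hp
  have hmemM : ∀ p ∈ M, PySem.Chars.isalpha p.2 = true ∨ p.2 = ' ' :=
    fun p hp => hmem p ((List.dropWhile_sublist _).subset hp)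
  have hpt1 : ∀ p ∈ L, PySem.Chars.isspace (Prod.snd p) = pvSp p :=
    fun p hp => pv_isspace_eq (hmem p hp)
  have hlow : ∀ X : List (Int × Char),
      PySem.Chars.lower (X.map Prod.snd) = X.map (fun p => PySem.Chars.lowerChar p.2) := by
    intro X; simp [PySem.Chars.lower, List.map_map]
  have hlstrip : PySem.Chars.lstrip (L.map Prod.snd) = M.map Prod.snd :=
    pv_lstrip_map Prod.snd L hpt1
  have hrstrip : PySem.Chars.rstrip (L.map Prod.snd) = (pvTT L).map Prod.snd :=
    pv_rstrip_map Prod.snd L hpt1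
  have hchars : PySem.Chars.strip (PySem.Chars.lower (L.map Prod.snd)) = (pvOut (pvTT M)).1 := by
    rw [hlow L, PySem.Chars.strip,
      pv_lstrip_map (fun p => PySem.Chars.lowerChar p.2) L
        (fun p hp => pv_isspace_lower (hmem p hp)),
      pv_rstrip_map (fun p => PySem.Chars.lowerChar p.2) M
        (fun p hp => pv_isspace_lower (hmemM p hp))]
    rfl
  have hlenM : M.length ≤ L.length := (List.dropWhile_sublist _).length_le
  have hn1 : (((L.map Prod.snd).length : Int) -
      ((PySem.Chars.lstrip (L.map Prod.snd)).length : Int)).toNat = L.length - M.length := by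
    rw [hlstrip]
    simp only [List.length_map]
    omega
  have h0 : (0 : Int) ≤ ((L.map Prod.snd).length : Int) -
      ((PySem.Chars.lstrip (L.map Prod.snd)).length : Int) := by
    rw [hlstrip]; simp only [List.length_map]; omega
  rw [PySem.List.slice_from _ h0, hn1]
  have hdrop : (L.map Prod.fst).drop (L.length - M.length) = M.map Prod.fst := by
    rw [← List.map_drop]
    have : L.drop (L.length - M.length) = M := by
      conv_rhs => rw [hMdef, pv_dL_eq_drop L]
    rw [this]
  rw [hdrop, hrstrip]
  have hTTpre := pv_TT_prefix L
  by_cases hTT : pvTT L = L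
  · rw [if_neg (by rw [hTT]; exact fun h => h rfl)]
    have : pvTT M = M := by
      rw [hMdef, pv_TT_dL_comm L, hTT]
    refine Prod.ext_iff.mpr ⟨congrArg String.ofList hchars, ?_⟩
    simp [pvOut, this]
  · have hlt : (pvTT L).length < L.length :=
      lt_of_le_of_ne hTTpre.length_le (fun h => hTT (hTTpre.eq_of_length h))
    rw [if_pos (by
      intro h
      exact hTT (hTTpre.eq_of_length (by
        have := congrArg List.length h
        simpa using this)))]
    set k : Nat := L.length - (pvTT L).length with hkdef
    have hbound : (((pvTT L).map Prod.snd).length : Int) - ((L.map Prod.snd).length : Int) =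
        -(k : Int) := by
      simp only [List.length_map]
      omega
    rw [hbound, PySem.List.slice_to_neg_natCast _ k (by omega)]
    refine Prod.ext_iff.mpr ⟨congrArg String.ofList hchars, ?_⟩
    simp only [pvOut, List.length_map]
    rcases hMe : M with _ | ⟨m, M'⟩
    · simp [pvTT]
    · have hMne : M ≠ [] := by rw [hMe]; exact List.cons_ne_nil _ _
      have hm : pvSp m = false := by
        have hw : List.dropWhile pvSp L ≠ [] := hMne
        have hhd := List.head_dropWhile_not pvSp hw
        have hlist : List.dropWhile pvSp L = m :: M' := hMe
        simp only [hlist, List.head_cons] at hhd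
        exact hhd
      have hTTM : pvTT (m :: M') = m :: pvTT M' := pv_TT_cons_nsp m M' hm
      have hTTMne : pvTT (m :: M') ≠ [] := by rw [hTTM]; exact List.cons_ne_nil _ _
      have hsplitL : L.takeWhile pvSp ++ M = L := List.takeWhile_append_dropWhile
      have hTTL2 : pvTT L = L.takeWhile pvSp ++ pvTT (m :: M') := by
        conv_lhs => rw [← hsplitL, hMe]
        exact pv_TT_append _ _ hTTMne
      have hlen1 : (L.takeWhile pvSp).length + M.length = L.length := by
        have := congrArg List.length hsplitL
        simpa [List.length_append] using this
      have hlen2 : (pvTT L).length = (L.takeWhile pvSp).length + (pvTT (m :: M')).length := by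
        rw [hTTL2]; simp [List.length_append]
      have hlenTTM : (pvTT (m :: M')).length ≤ (m :: M').length :=
        (pv_TT_prefix (m :: M')).length_le
      have hpm : (pvTT (m :: M')).map Prod.fst =
          ((m :: M').map Prod.fst).take ((pvTT (m :: M')).length) := by
        have hpre := (pv_TT_prefix (m :: M')).map Prod.fst
        rw [List.prefix_iff_eq_take] at hpre
        simpa using hpre
      rw [hpm]
      have hklen : (pvTT (m :: M')).length = (m :: M').length - k := by
        rw [hMe] at hlen1
        omega
      rw [hklen]
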